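-- pv_equiv track=rewrite | github.com/jhillierdavis/advent-of-code-solutions | aoc-2023/aoc-2023-day-20/solution-in-python3/solution.py | get_prior_conjuctions
-- ===== SOURCE A (Python) =====
-- def get_prior_conjuctions(module_config_map, target):
--     values = []
--     for k, v in module_config_map.items():
--         if target in v:
--             values.append(k)
--     if len(values) == 1:
--         return get_prior_conjuctions(module_config_map, values[0])
--     return values
-- ===== SOURCE B (Python) =====
-- def get_prior_conjuctions(module_config_map, target):
--     # Build the reverse-predecessor index once, then walk it iteratively.
--     rev = {}
--     for k, v in module_config_map.items():
--         for n in dict.fromkeys(v):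
--             rev.setdefault(n, []).append(k)
--     current = target
--     while True:
--         values = rev.get(current, [])
--         if len(values) != 1:
--             return values
--         current = values[0]
-- ===== Notes on version B (the rewrite author's own statement) =====
-- stated objective: alternative
-- what changed: A rescans the whole map for predecessors at every step of its tail recursion; B builds a reverse-predecessor index in one pass over the map and then walks the sole-predecessor chain with an iterative loop of O(1) lookups.
import Mathlib
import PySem

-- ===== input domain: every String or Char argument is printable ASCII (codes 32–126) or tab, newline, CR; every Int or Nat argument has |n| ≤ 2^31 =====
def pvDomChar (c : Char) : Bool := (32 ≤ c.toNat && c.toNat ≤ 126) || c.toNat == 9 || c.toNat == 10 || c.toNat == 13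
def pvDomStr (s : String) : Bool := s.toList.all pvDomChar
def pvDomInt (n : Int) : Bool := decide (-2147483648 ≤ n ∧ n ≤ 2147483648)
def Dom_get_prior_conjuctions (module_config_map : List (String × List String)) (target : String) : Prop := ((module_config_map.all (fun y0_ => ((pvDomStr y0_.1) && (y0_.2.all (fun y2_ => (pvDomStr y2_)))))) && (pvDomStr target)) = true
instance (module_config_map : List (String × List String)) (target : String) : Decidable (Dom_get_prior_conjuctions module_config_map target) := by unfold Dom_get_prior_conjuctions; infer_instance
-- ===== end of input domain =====

-- B builds a reverse-predecessor index once and walks it iteratively, instead of rescanning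
-- the whole map at every recursive step (alternative decomposition; not measured faster).


-- ===== PORT A =====
-- A's recursion may not terminate (cyclic sole-predecessor chains ⇒ Python RecursionError),
-- so the port carries fuel = number of map entries + 1; Pre_ guarantees the fuel is never
-- exhausted, so the `0` branch (returning []) is unreachable on admitted inputs.
def pvGoA (items : List (String × List String)) : Nat → String → List String
  | 0, _ => []
  | n+1, target =>
    -- values = []; for k, v in module_config_map.items(): if target in v: values.append(k)
    let values := items.foldl (fun vs kv => if target ∈ kv.2 then vs ++ [kv.1] else vs) []
    if values.length = 1 then pvGoA items n (values.headD "") else values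

def get_prior_conjuctions (module_config_map : List (String × List String)) (target : String) : List String :=
  pvGoA (PySem.Dict.ofList module_config_map).items (module_config_map.length + 1) target

-- ===== PORT B =====
-- rev = {}; for k, v in m.items(): for n in dict.fromkeys(v): rev.setdefault(n, []).append(k)
def pvRev (items : List (String × List String)) : PySem.Dict String (List String) :=
  items.foldl
    (fun rev kv =>
      (PySem.List.dedup kv.2).foldl (fun rev n => rev.modify n [] (fun l => l ++ [kv.1])) rev)
    PySem.Dict.empty

-- the `while True` walk; same fuel artifact as A's port (the loop diverges on cycles)
def pvLoopB (rev : PySem.Dict String (List String)) : Nat → String → List String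
  | 0, cur => rev.getD cur []
  | n+1, cur =>
    let values := rev.getD cur []
    if values.length ≠ 1 then values else pvLoopB rev n (values.headD "")

def get_prior_conjuctions_alt (module_config_map : List (String × List String)) (target : String) : List String :=
  pvLoopB (pvRev (PySem.Dict.ofList module_config_map).items) (module_config_map.length + 1) target

-- ===== PRECONDITION & SPEC =====
-- spec-level predecessor list and sole-predecessor step (used only by Pre_)
def pvPreds (module_config_map : List (String × List String)) (t : String) : List String :=
  (((PySem.Dict.ofList module_config_map).items).filter (fun kv => t ∈ kv.2)).map (fun kv => kv.1)

def pvStep (module_config_map : List (String × List String)) : Option String → Option String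
  | none => none
  | some t =>
    match pvPreds module_config_map t with
    | [k] => some k
    | _ => none

def pvIter (module_config_map : List (String × List String)) : Nat → Option String → Option String
  | 0, s => s
  | n+1, s => pvIter module_config_map n (pvStep module_config_map s)

-- Pre_ excludes exactly the inputs on which the chain of sole predecessors from target cycles:
-- there Python A recurses forever and raises RecursionError (B's while-loop also diverges).
-- If the chain survives length+1 steps it must revisit a key, hence cycle, so this is exact.
def Pre_get_prior_conjuctions (module_config_map : List (String × List String)) (target : String) : Prop :=
  pvIter module_config_map (module_config_map.length + 1) (some target) = none
instance (module_config_map : List (String × List String)) (target : String) : Decidable (Pre_get_prior_conjuctions module_config_map target) := by unfold Pre_get_prior_conjuctions; infer_instance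

def pvWitness_get_prior_conjuctions : (List (String × List String)) × String :=
  ([("a", ["b"]), ("x", ["t"]), ("y", ["t"])], "t")

def Spec_get_prior_conjuctions (module_config_map : List (String × List String)) (target : String) (out : List String) : Prop := out = get_prior_conjuctions_alt module_config_map target
instance (module_config_map : List (String × List String)) (target : String) (out : List String) : Decidable (Spec_get_prior_conjuctions module_config_map target out) := by unfold Spec_get_prior_conjuctions; infer_instance

-- ===== CLAIM (what is proved, stated in full; the proofs are below) =====
def Claim_equal_get_prior_conjuctions : Prop := ∀ (module_config_map : List (String × List String)) (target : String), Dom_get_prior_conjuctions module_config_map target → Pre_get_prior_conjuctions module_config_map target → Spec_get_prior_conjuctions module_config_map target (get_prior_conjuctions module_config_map target)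

-- ===== LEMMAS AND PROOFS =====

-- inner loop of the index build: one key appended per distinct neighbour
theorem pv_getD_foldl_modify (l : List String) (hl : l.Nodup) (k t : String)
    (r : PySem.Dict String (List String)) :
    (l.foldl (fun r n => r.modify n [] (fun xs => xs ++ [k])) r).getD t []
      = r.getD t [] ++ (if t ∈ l then [k] else []) := by
  induction l generalizing r with
  | nil => simp
  | cons n l ih =>
    rcases List.nodup_cons.mp hl with ⟨hn, hl'⟩
    rw [List.foldl_cons, ih hl']
    by_cases h : t = n
    · subst h
      have hnl : t ∉ l := hn
      simp [PySem.Dict.getD_modify_self, hnl]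
    · have hne : (PySem.Dict.modify r n [] fun xs => xs ++ [k]).getD t [] = r.getD t [] :=
        PySem.Dict.getD_modify_of_ne r [] (fun xs => xs ++ [k]) h
      simp [hne, List.mem_cons, h]

-- the reverse index bucket of t is exactly A's predecessor scan result
theorem pv_rev_getD (items : List (String × List String)) (t : String) :
    (pvRev items).getD t [] = (items.filter (fun kv => t ∈ kv.2)).map (fun kv => kv.1) := by
  unfold pvRev
  have gen : ∀ (r : PySem.Dict String (List String)),
      (items.foldl
        (fun rev kv =>
          (PySem.List.dedup kv.2).foldl (fun rev n => rev.modify n [] (fun l => l ++ [kv.1])) rev)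
        r).getD t []
      = r.getD t [] ++ (items.filter (fun kv => t ∈ kv.2)).map (fun kv => kv.1) := by
    induction items with
    | nil => simp
    | cons kv items ih =>
      intro r
      rw [List.foldl_cons, ih]
      rw [pv_getD_foldl_modify _ (PySem.List.nodup_dedup _) kv.1 t r]
      by_cases h : t ∈ kv.2 <;> simp [h]
  rw [gen]; simp

-- A's scan as filter/map
theorem pv_scanA (items : List (String × List String)) (t : String) :
    items.foldl (fun vs kv => if t ∈ kv.2 then vs ++ [kv.1] else vs) ([] : List String)
      = (items.filter (fun kv => t ∈ kv.2)).map (fun kv => kv.1) := by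
  rw [PySem.List.foldl_append_ite]; simp

-- main induction: while the iterated sole-predecessor chain dies within the fuel,
-- A's recursion and B's indexed walk agree
theorem pv_go_eq (m : List (String × List String)) :
    ∀ (n : Nat) (t : String), pvIter m n (some t) = none →
      pvGoA (PySem.Dict.ofList m).items n t
        = pvLoopB (pvRev (PySem.Dict.ofList m).items) n t := by
  intro n
  induction n with
  | zero => intro t h; simp [pvIter] at h
  | succ n ih =>
    intro t h
    have hpred : (PySem.Dict.ofList m).items.foldl
        (fun vs kv => if t ∈ kv.2 then vs ++ [kv.1] else vs) ([] : List String)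
        = pvPreds m t := by
      rw [pv_scanA]; rfl
    have hrev : (pvRev (PySem.Dict.ofList m).items).getD t [] = pvPreds m t := by
      rw [pv_rev_getD]; rfl
    have hstep : pvIter m (n+1) (some t) = pvIter m n (pvStep m (some t)) := rfl
    rw [hstep] at h
    show (let values := (PySem.Dict.ofList m).items.foldl
            (fun vs kv => if t ∈ kv.2 then vs ++ [kv.1] else vs) ([] : List String);
          if values.length = 1 then pvGoA (PySem.Dict.ofList m).items n (values.headD "") else values)
        = (let values := (pvRev (PySem.Dict.ofList m).items).getD t [];
          if values.length ≠ 1 then values else pvLoopB (pvRev (PySem.Dict.ofList m).items) n (values.headD ""))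
    simp only [hpred, hrev]
    match hv : pvPreds m t with
    | [] => simp
    | [k] =>
      have : pvStep m (some t) = some k := by simp [pvStep, hv]
      rw [this] at h
      simp [ih k h]
    | k :: k' :: rest => simp
-- note: `values.length = 1` holds exactly on the `[k]` branch, handled by the match above

-- ===== VERDICT (by name: the statement is the Claim_ definition above) =====
theorem get_prior_conjuctions_spec : Claim_equal_get_prior_conjuctions := by
  intro m t _hDom hPre
  unfold Spec_get_prior_conjuctions get_prior_conjuctions get_prior_conjuctions_alt
  exact pv_go_eq m (m.length + 1) t hPre
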